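-- pv_equiv track=rewrite | github.com/LuisPalominoTrevilla/CompetitiveProgramming | songsCompression.py | songsCompression
-- ===== SOURCE A (Python) =====
-- def songsCompression(songs, n, capacity, sum):
--     songs.sort(reverse=True)
--     compressed=0
--     if sum <= capacity: return 0
--     for song in songs:
--         if sum - song > capacity:
--             sum-= song
--             compressed+=1
--         else:
--             compressed+=1
--             return compressed
--     return -1
-- ===== SOURCE B (Python) =====
-- def songsCompression(songs, n, capacity, sum):
--     songs.sort(reverse=True)
--     need = sum - capacity
--     if need <= 0:
--         return 0
--     # prefix-sum table of the sorted list, then first index whose prefix covers the need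
--     prefixes = songs.copy()
--     for i in range(1, len(prefixes)):
--         prefixes[i] += prefixes[i - 1]
--     return next((i + 1 for i, p in enumerate(prefixes) if p >= need), -1)
-- ===== Notes on version B (the rewrite author's own statement) =====
-- stated objective: alternative
-- what changed: Replaces A's greedy scan that mutates the remaining sum and counts with an explicit counter by a precomputed prefix-sum table of the sorted list followed by a first-match search for the smallest prefix covering need = sum - capacity.
import Mathlib
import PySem

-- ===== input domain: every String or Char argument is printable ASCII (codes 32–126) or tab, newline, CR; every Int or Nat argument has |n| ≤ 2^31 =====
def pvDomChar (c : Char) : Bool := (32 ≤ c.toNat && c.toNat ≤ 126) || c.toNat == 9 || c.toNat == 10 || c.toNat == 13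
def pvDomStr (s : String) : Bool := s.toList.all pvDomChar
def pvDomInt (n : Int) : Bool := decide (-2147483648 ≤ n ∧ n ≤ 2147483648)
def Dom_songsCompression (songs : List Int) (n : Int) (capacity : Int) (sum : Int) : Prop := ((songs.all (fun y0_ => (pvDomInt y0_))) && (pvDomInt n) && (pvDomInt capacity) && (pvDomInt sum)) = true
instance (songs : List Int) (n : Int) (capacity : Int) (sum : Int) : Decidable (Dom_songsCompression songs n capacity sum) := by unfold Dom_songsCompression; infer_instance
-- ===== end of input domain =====

-- B replaces A's greedy remaining-sum scan by a prefix-sum table plus first-match search (alternative decomposition, same cost).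
-- Both versions sort `songs` in place (same mutation); the equivalence proved is about the return value.


-- ===== PORT A =====
-- the for-loop over the sorted list, carrying the mutated `sum` and the counter `compressed`
def songsLoopA (capacity : Int) : List Int → Int → Int → Int
  | [], _, _ => -1
  | song :: rest, sum, compressed =>
    if sum - song > capacity then songsLoopA capacity rest (sum - song) (compressed + 1)
    else compressed + 1

def songsCompression (songs : List Int) (n : Int) (capacity : Int) (sum : Int) : Int :=
  let sortedSongs := PySem.List.sorted songs (fun x => x) true
  if sum ≤ capacity then 0
  else songsLoopA capacity sortedSongs sum 0

-- ===== PORT B =====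
-- prefix-sum table of the sorted list (B's in-place `prefixes[i] += prefixes[i-1]` pass)
def prefixTable : List Int → Int → List Int
  | [], _ => []
  | x :: rest, acc => (acc + x) :: prefixTable rest (acc + x)

-- B's `next((i+1 for i, p in enumerate(prefixes) if p >= need), -1)`
def firstCover (need : Int) : List Int → Int → Int
  | [], _ => -1
  | p :: rest, i => if p ≥ need then i + 1 else firstCover need rest (i + 1)

def songsCompression_alt (songs : List Int) (n : Int) (capacity : Int) (sum : Int) : Int :=
  let sortedSongs := PySem.List.sorted songs (fun x => x) true
  let need := sum - capacity
  if need ≤ 0 then 0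
  else firstCover need (prefixTable sortedSongs 0) 0

-- ===== PRECONDITION & SPEC =====
def Spec_songsCompression (songs : List Int) (n : Int) (capacity : Int) (sum : Int) (out : Int) : Prop := out = songsCompression_alt songs n capacity sum
instance (songs : List Int) (n : Int) (capacity : Int) (sum : Int) (out : Int) : Decidable (Spec_songsCompression songs n capacity sum out) := by unfold Spec_songsCompression; infer_instance

-- ===== CLAIM (what is proved, stated in full; the proofs are below) =====
def Claim_equal_songsCompression : Prop := ∀ (songs : List Int) (n : Int) (capacity : Int) (sum : Int), Dom_songsCompression songs n capacity sum → Spec_songsCompression songs n capacity sum (songsCompression songs n capacity sum)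

-- ===== LEMMAS AND PROOFS =====
-- Invariant: A's remaining sum is s0 - p where p is the prefix already taken; A's
-- continue-condition (s0 - p) - x > cap is the negation of B's cover-condition p + x ≥ s0 - cap.
theorem loopA_eq_firstCover (l : List Int) (cap s0 p c : Int) :
    songsLoopA cap l (s0 - p) c = firstCover (s0 - cap) (prefixTable l p) c := by
  induction l generalizing p c with
  | nil => simp [songsLoopA, prefixTable, firstCover]
  | cons x rest ih =>
    simp only [songsLoopA, prefixTable, firstCover]
    by_cases h : s0 - p - x > cap
    · rw [if_pos h, if_neg (by omega)]
      have := ih (p + x) (c + 1)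
      rw [show s0 - p - x = s0 - (p + x) by ring] at *
      exact this
    · rw [if_neg h, if_pos (by omega)]

-- ===== VERDICT (by name: the statement is the Claim_ definition above) =====
theorem songsCompression_spec : Claim_equal_songsCompression := by
  intro songs n capacity sum _
  unfold Spec_songsCompression songsCompression songsCompression_alt
  by_cases h : sum ≤ capacity
  · rw [if_pos h, if_pos (by omega)]
  · rw [if_neg h, if_neg (by omega)]
    have := loopA_eq_firstCover (PySem.List.sorted songs (fun x => x) true) capacity sum 0 0
    simpa using this
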